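-- pv_equiv track=rewrite | github.com/hsuanchia/Gomoku | core/rule.py | get_win_line
-- ===== SOURCE A (Python) =====
-- def get_win_line(grid, x, y, player, win_len=5):
--     """Return a list of coordinates [(x,y),...] that form the contiguous winning line
--     including the placed stone at (x,y). Returns None if no win is found."""
--     size = len(grid)
--     directions = [(1, 0), (0, 1), (1, 1), (1, -1)]
--     for dx, dy in directions:
--         coords = [(x, y)]
--         # forward
--         nx, ny = x, y
--         while True:
--             nx += dx
--             ny += dy
--             if 0 <= nx < size and 0 <= ny < size and grid[ny][nx] == player:
--                 coords.append((nx, ny))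
--             else:
--                 break
--         # backward
--         nx, ny = x, y
--         while True:
--             nx -= dx
--             ny -= dy
--             if 0 <= nx < size and 0 <= ny < size and grid[ny][nx] == player:
--                 coords.insert(0, (nx, ny))
--             else:
--                 break
--         if len(coords) >= win_len:
--             return coords
--     return None
-- ===== SOURCE B (Python) =====
-- def get_win_line(grid, x, y, player, win_len=5):
--     """Run-partition re-implementation: for each direction, sweep the whole
--     window t in [-size, size] left to right once, partitioning it into maximal
--     runs of player-matching cells (the placed cell t=0 matches unconditionally),
--     and return the run that contains t=0 if it is long enough."""
--     size = len(grid)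
--     for dx, dy in ((1, 0), (0, 1), (1, 1), (1, -1)):
--         def hit(t):
--             if t == 0:
--                 return True
--             cx, cy = x + t * dx, y + t * dy
--             if 0 <= cx < size and 0 <= cy < size:
--                 row = grid[cy]
--                 return cx < len(row) and row[cx] == player
--             return False
--         run_start = -size
--         for t in range(-size, size + 2):
--             if t <= size and hit(t):
--                 continue
--             # the maximal run [run_start, t-1] just ended
--             if run_start <= 0 <= t - 1:
--                 if t - run_start >= win_len:
--                     return [(x + u * dx, y + u * dy) for u in range(run_start, t)]
--                 break  # the run through (x, y) is too short in this direction
--             run_start = t + 1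
--     return None
-- ===== Notes on version B (the rewrite author's own statement) =====
-- stated objective: alternative
-- what changed: A grows the line by two outward walks from the placed stone (append forward, insert(0,..) backward); B never walks outward: per direction it makes one left-to-right sweep over the fixed offset window [-size, size], partitioning it into maximal runs of matching cells (offset 0 matches unconditionally), and returns the run containing offset 0 if it reaches win_len.
import Mathlib
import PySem

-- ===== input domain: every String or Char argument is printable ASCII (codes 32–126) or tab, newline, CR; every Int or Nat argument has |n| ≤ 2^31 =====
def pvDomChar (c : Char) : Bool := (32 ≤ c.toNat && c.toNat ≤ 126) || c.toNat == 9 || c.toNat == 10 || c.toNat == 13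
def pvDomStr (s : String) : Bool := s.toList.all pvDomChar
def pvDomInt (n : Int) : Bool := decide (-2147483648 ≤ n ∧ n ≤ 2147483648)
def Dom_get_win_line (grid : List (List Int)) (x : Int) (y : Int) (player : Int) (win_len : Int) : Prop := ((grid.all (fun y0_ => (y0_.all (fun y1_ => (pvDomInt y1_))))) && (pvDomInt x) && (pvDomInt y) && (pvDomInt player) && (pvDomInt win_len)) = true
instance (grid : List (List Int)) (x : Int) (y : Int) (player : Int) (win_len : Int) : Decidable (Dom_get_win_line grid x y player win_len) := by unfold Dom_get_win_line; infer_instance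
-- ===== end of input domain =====

-- B replaces A's two outward walks from the placed stone by a single left-to-right sweep
-- over the offset window [-size, size] that partitions it into maximal runs and returns
-- the run containing offset 0 ("alternative").

-- ===== PORT A =====
-- A's cell test: 0 <= nx < size and 0 <= ny < size and grid[ny][nx] == player
-- (grid[ny][nx] via pyGet?; under Pre_ the row access never raises)
def pvOk (grid : List (List Int)) (player nx ny : Int) : Bool :=
  decide (0 ≤ nx) && decide (nx < (grid.length : Int)) && decide (0 ≤ ny) && decide (ny < (grid.length : Int)) &&
  (((PySem.List.pyGet? grid ny).bind fun row => PySem.List.pyGet? row nx) == some player)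

-- forward while-loop of A (fuel = size+1 only makes the loop total; it never runs out
-- because each passing step moves the position strictly inside [0, size))
def pvFwdA (grid : List (List Int)) (player dx dy : Int) : Nat → Int → Int → List (Int × Int) → List (Int × Int)
  | 0, _, _, coords => coords
  | fuel+1, nx, ny, coords =>
    if pvOk grid player (nx + dx) (ny + dy) then
      pvFwdA grid player dx dy fuel (nx + dx) (ny + dy) (coords ++ [(nx + dx, ny + dy)])
    else coords

-- backward while-loop of A (coords.insert(0, v) = v :: coords)
def pvBwdA (grid : List (List Int)) (player dx dy : Int) : Nat → Int → Int → List (Int × Int) → List (Int × Int)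
  | 0, _, _, coords => coords
  | fuel+1, nx, ny, coords =>
    if pvOk grid player (nx - dx) (ny - dy) then
      pvBwdA grid player dx dy fuel (nx - dx) (ny - dy) ((nx - dx, ny - dy) :: coords)
    else coords

def pvGoA (grid : List (List Int)) (x y player win_len : Int) : List (Int × Int) → Option (List (Int × Int))
  | [] => none
  | (dx, dy) :: rest =>
    let coords := pvBwdA grid player dx dy (grid.length + 1) x y
                    (pvFwdA grid player dx dy (grid.length + 1) x y [(x, y)])
    if win_len ≤ (coords.length : Int) then some coords
    else pvGoA grid x y player win_len rest

def get_win_line (grid : List (List Int)) (x : Int) (y : Int) (player : Int) (win_len : Int) : Option (List (Int × Int)) :=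
  pvGoA grid x y player win_len [(1, 0), (0, 1), (1, 1), (1, -1)]

-- ===== PORT B =====
-- B's cell test hit(t) for t ≠ 0: bounds check, then guarded row access (cx < len(row) and row[cx] == player)
def pvHitCell (grid : List (List Int)) (player cx cy : Int) : Bool :=
  if decide (0 ≤ cx) && decide (cx < (grid.length : Int)) && decide (0 ≤ cy) && decide (cy < (grid.length : Int)) then
    decide (cx < ((grid.getD cy.toNat []).length : Int)) && ((grid.getD cy.toNat []).getD cx.toNat 0 == player)
  else false

def pvHit (grid : List (List Int)) (player x y dx dy t : Int) : Bool :=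
  (t == 0) || pvHitCell grid player (x + t * dx) (y + t * dy)

-- B's inner for-loop over t in range(-size, size+2), carrying run_start
-- (fuel = 2*size+2, the exact number of iterations of the Python for-loop)
def pvSweepB (grid : List (List Int)) (player x y dx dy win_len : Int) : Nat → Int → Int → Option (List (Int × Int))
  | 0, _, _ => none  -- for-loop exhausted without a run through 0: next direction
  | fuel+1, t, run_start =>
    if decide (t ≤ (grid.length : Int)) && pvHit grid player x y dx dy t then
      pvSweepB grid player x y dx dy win_len fuel (t + 1) run_start
    else if decide (run_start ≤ 0) && decide (0 ≤ t - 1) then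
      -- the maximal run [run_start, t-1] contains 0
      if win_len ≤ t - run_start then
        some ((PySem.List.pyRange run_start t 1).map (fun u => (x + u * dx, y + u * dy)))
      else none  -- break: run through (x, y) too short in this direction
    else pvSweepB grid player x y dx dy win_len fuel (t + 1) (t + 1)

def pvGoB (grid : List (List Int)) (x y player win_len : Int) : List (Int × Int) → Option (List (Int × Int))
  | [] => none
  | (dx, dy) :: rest =>
    match pvSweepB grid player x y dx dy win_len (2 * grid.length + 2)
            (-(grid.length : Int)) (-(grid.length : Int)) with
    | some l => some l
    | none => pvGoB grid x y player win_len rest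

def get_win_line_alt (grid : List (List Int)) (x : Int) (y : Int) (player : Int) (win_len : Int) : Option (List (Int × Int)) :=
  pvGoB grid x y player win_len [(1, 0), (0, 1), (1, 1), (1, -1)]

-- ===== PRECONDITION & SPEC =====
-- helpers for Pre_: bounds test, clamped cell lookup, and bounded-quantifier formulas
def pvInB (size : Nat) (nx ny : Int) : Bool :=
  decide (0 ≤ nx) && decide (nx < (size : Int)) && decide (0 ≤ ny) && decide (ny < (size : Int))

def pvCellQ (grid : List (List Int)) (nx ny : Int) : Option Int :=
  (grid[ny.toNat]?).bind fun r => r[nx.toNat]?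

-- the first t probed cells in direction s*d from (x,y) are in bounds, inside their row, and hold player
def pvChain (grid : List (List Int)) (x y player : Int) (d : Int × Int) (s : Int) (t : Nat) : Bool :=
  (List.range' 1 t).all fun u =>
    pvInB grid.length (x + s * (u : Int) * d.1) (y + s * (u : Int) * d.2) &&
    (pvCellQ grid (x + s * (u : Int) * d.1) (y + s * (u : Int) * d.2) == some player)

-- direction d yields a winning line of length at least win_len
def pvWins (grid : List (List Int)) (x y player win_len : Int) (d : Int × Int) : Bool :=
  (List.range (grid.length + 1)).any fun tf => (List.range (grid.length + 1)).any fun tb =>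
    pvChain grid x y player d 1 tf && pvChain grid x y player d (-1) tb &&
    decide (win_len ≤ (tf : Int) + (tb : Int) + 1)

-- scanning direction d never probes an in-bounds cell beyond the end of its (short) row
def pvNoRaise (grid : List (List Int)) (x y player : Int) (d : Int × Int) : Bool :=
  [(1 : Int), -1].all fun s => (List.range' 1 (grid.length + 1)).all fun t =>
    !(pvChain grid x y player d s (t - 1) &&
      pvInB grid.length (x + s * (t : Int) * d.1) (y + s * (t : Int) * d.2)) ||
    decide ((x + s * (t : Int) * d.1).toNat <
      ((grid[(y + s * (t : Int) * d.2).toNat]?).map List.length).getD 0)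

def pvDirs : List (Int × Int) := [(1, 0), (0, 1), (1, 1), (1, -1)]

-- Pre_ holds exactly when the Python A finishes without IndexError: on ragged grids a scan can
-- index a row shorter than size; Pre_ says that in every direction A actually scans (i.e. before
-- any earlier direction already wins), each probed in-bounds cell lies within its row.
def Pre_get_win_line (grid : List (List Int)) (x : Int) (y : Int) (player : Int) (win_len : Int) : Prop :=
  ((List.range 4).all fun i =>
    !((List.range i).all fun j => !pvWins grid x y player win_len (pvDirs.getD j (0, 0))) ||
    pvNoRaise grid x y player (pvDirs.getD i (0, 0))) = true
instance (grid : List (List Int)) (x : Int) (y : Int) (player : Int) (win_len : Int) : Decidable (Pre_get_win_line grid x y player win_len) := by unfold Pre_get_win_line; infer_instance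

def pvWitness_get_win_line : List (List Int) × Int × Int × Int × Int :=
  ([[1, 1, 1], [0, 1, 0], [0, 0, 1]], 1, 0, 1, 3)

def Spec_get_win_line (grid : List (List Int)) (x : Int) (y : Int) (player : Int) (win_len : Int) (out : Option (List (Int × Int))) : Prop := out = get_win_line_alt grid x y player win_len
instance (grid : List (List Int)) (x : Int) (y : Int) (player : Int) (win_len : Int) (out : Option (List (Int × Int))) : Decidable (Spec_get_win_line grid x y player win_len out) := by unfold Spec_get_win_line; infer_instance

-- ===== CLAIM (what is proved, stated in full; the proofs are below) =====
def Claim_equal_get_win_line : Prop := ∀ (grid : List (List Int)) (x : Int) (y : Int) (player : Int) (win_len : Int), Dom_get_win_line grid x y player win_len → Pre_get_win_line grid x y player win_len → Spec_get_win_line grid x y player win_len (get_win_line grid x y player win_len)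

-- ===== LEMMAS AND PROOFS =====

-- proof-side gadget: length of the maximal matching prefix step count in direction (dx,dy)
def pvCount (grid : List (List Int)) (player dx dy x y : Int) : Nat → Nat → Nat
  | 0, k => k
  | fuel+1, k =>
    if pvOk grid player (x + ((k : Int) + 1) * dx) (y + ((k : Int) + 1) * dy) then
      pvCount grid player dx dy x y fuel (k + 1)
    else k

theorem pvCount_le (grid : List (List Int)) (player dx dy x y : Int) :
    ∀ fuel k, k ≤ pvCount grid player dx dy x y fuel k := by
  intro fuel
  induction fuel with
  | zero => intro k; simp [pvCount]
  | succ n ih =>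
    intro k
    simp only [pvCount]
    split
    · exact le_trans (Nat.le_succ k) (ih (k + 1))
    · exact le_refl k

theorem pvCount_bound (grid : List (List Int)) (player dx dy x y : Int) :
    ∀ fuel k, pvCount grid player dx dy x y fuel k ≤ k + fuel := by
  intro fuel
  induction fuel with
  | zero => intro k; simp [pvCount]
  | succ n ih =>
    intro k
    simp only [pvCount]
    split
    · exact le_trans (ih (k + 1)) (by omega)
    · omega

theorem pvCount_ok (grid : List (List Int)) (player dx dy x y : Int) :
    ∀ fuel k j, k < j → j ≤ pvCount grid player dx dy x y fuel k →
      pvOk grid player (x + (j : Int) * dx) (y + (j : Int) * dy) = true := by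
  intro fuel
  induction fuel with
  | zero => intro k j h1 h2; simp [pvCount] at h2; omega
  | succ n ih =>
    intro k j h1 h2
    simp only [pvCount] at h2
    by_cases hok : pvOk grid player (x + ((k : Int) + 1) * dx) (y + ((k : Int) + 1) * dy) = true
    · rw [if_pos hok] at h2
      rcases Nat.lt_or_ge (k + 1) j with hj | hj
      · exact ih (k + 1) j hj h2
      · have hj' : j = k + 1 := by omega
        subst hj'
        have hcast : ((k : Int) + 1) = ((k + 1 : Nat) : Int) := by push_cast; ring
        rw [hcast] at hok
        exact hok
    · rw [if_neg hok] at h2; omega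

theorem pvCount_stop (grid : List (List Int)) (player dx dy x y : Int) :
    ∀ fuel k, pvCount grid player dx dy x y fuel k < k + fuel →
      pvOk grid player (x + ((pvCount grid player dx dy x y fuel k : Int) + 1) * dx)
        (y + ((pvCount grid player dx dy x y fuel k : Int) + 1) * dy) = false := by
  intro fuel
  induction fuel with
  | zero => intro k h; simp [pvCount] at h
  | succ n ih =>
    intro k h
    simp only [pvCount] at h ⊢
    by_cases hok : pvOk grid player (x + ((k : Int) + 1) * dx) (y + ((k : Int) + 1) * dy) = true
    · rw [if_pos hok] at h ⊢
      exact ih (k + 1) (by omega)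
    · rw [if_neg hok] at h ⊢
      exact Bool.eq_false_iff.mpr (fun hc => hok hc)

theorem pvOk_bounds (grid : List (List Int)) (player nx ny : Int) (h : pvOk grid player nx ny = true) :
    0 ≤ nx ∧ nx < (grid.length : Int) ∧ 0 ≤ ny ∧ ny < (grid.length : Int) := by
  simp only [pvOk, Bool.and_eq_true, decide_eq_true_eq] at h
  tauto

-- a line with a ±1 component cannot match at two offsets a and a+size
theorem pvPigeon (grid : List (List Int)) (player x y dx dy : Int)
    (hc : dx = 1 ∨ dx = -1 ∨ dy = 1 ∨ dy = -1) (a : Int)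
    (h1 : pvOk grid player (x + a * dx) (y + a * dy) = true)
    (h2 : pvOk grid player (x + (a + (grid.length : Int)) * dx) (y + (a + (grid.length : Int)) * dy) = true) :
    False := by
  obtain ⟨b1x, b1x', b1y, b1y'⟩ := pvOk_bounds _ _ _ _ h1
  obtain ⟨b2x, b2x', b2y, b2y'⟩ := pvOk_bounds _ _ _ _ h2
  rcases hc with h | h | h | h <;> subst h <;>
    simp only [mul_one, mul_neg_one] at b1x b1x' b1y b1y' b2x b2x' b2y b2y' <;> omega

-- the size+1-fuel count is ≤ size, all counted steps match, and the next step fails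
theorem pvCount_facts (grid : List (List Int)) (player dx dy x y : Int)
    (hc : dx = 1 ∨ dx = -1 ∨ dy = 1 ∨ dy = -1) :
    ((pvCount grid player dx dy x y (grid.length + 1) 0 : Int) ≤ (grid.length : Int)) ∧
    (∀ t : Int, 1 ≤ t → t ≤ (pvCount grid player dx dy x y (grid.length + 1) 0 : Int) →
      pvOk grid player (x + t * dx) (y + t * dy) = true) ∧
    pvOk grid player (x + ((pvCount grid player dx dy x y (grid.length + 1) 0 : Int) + 1) * dx)
      (y + ((pvCount grid player dx dy x y (grid.length + 1) 0 : Int) + 1) * dy) = false := by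
  have hb := pvCount_bound grid player dx dy x y (grid.length + 1) 0
  have hok : ∀ t : Int, 1 ≤ t → t ≤ (pvCount grid player dx dy x y (grid.length + 1) 0 : Int) →
      pvOk grid player (x + t * dx) (y + t * dy) = true := by
    intro t ht1 ht2
    have ht0 : t = ((t.toNat : Nat) : Int) := by omega
    rw [ht0]
    exact pvCount_ok grid player dx dy x y (grid.length + 1) 0 t.toNat (by omega) (by omega)
  have hle : pvCount grid player dx dy x y (grid.length + 1) 0 ≤ grid.length := by
    by_contra hgt
    have heq : pvCount grid player dx dy x y (grid.length + 1) 0 = grid.length + 1 := by omega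
    have o1 : pvOk grid player (x + 1 * dx) (y + 1 * dy) = true := hok 1 le_rfl (by omega)
    have o2 : pvOk grid player (x + (1 + (grid.length : Int)) * dx) (y + (1 + (grid.length : Int)) * dy) = true := by
      have := hok ((grid.length : Int) + 1) (by omega) (by omega)
      have harg : (1 + (grid.length : Int)) = ((grid.length : Int) + 1) := by ring
      rw [harg]
      exact this
    exact pvPigeon grid player x y dx dy hc 1 o1 o2
  refine ⟨by exact_mod_cast hle, hok, ?_⟩
  exact pvCount_stop grid player dx dy x y (grid.length + 1) 0 (by omega)

-- ===== A-side characterisation: coords = arithmetic range map from the backmost endpoint =====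
theorem pvFwdA_eq (grid : List (List Int)) (player dx dy x y : Int) :
    ∀ fuel (k : Nat) (coords : List (Int × Int)),
      pvFwdA grid player dx dy fuel (x + (k : Int) * dx) (y + (k : Int) * dy) coords =
      coords ++ (List.range' (k + 1) (pvCount grid player dx dy x y fuel k - k)).map
        (fun j : Nat => (x + (j : Int) * dx, y + (j : Int) * dy)) := by
  intro fuel
  induction fuel with
  | zero => intro k coords; simp [pvFwdA, pvCount]
  | succ n ih =>
    intro k coords
    have hx : x + (k : Int) * dx + dx = x + ((k : Int) + 1) * dx := by ring
    have hy : y + (k : Int) * dy + dy = y + ((k : Int) + 1) * dy := by ring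
    simp only [pvFwdA, pvCount, hx, hy]
    split
    · have hk1 : x + ((k : Int) + 1) * dx = x + ((k + 1 : Nat) : Int) * dx := by push_cast; ring
      have hk2 : y + ((k : Int) + 1) * dy = y + ((k + 1 : Nat) : Int) * dy := by push_cast; ring
      rw [hk1, hk2, ih (k + 1)]
      have hle : k + 1 ≤ pvCount grid player dx dy x y n (k + 1) := pvCount_le _ _ _ _ _ _ _ _
      have hrange : List.range' (k + 1) (pvCount grid player dx dy x y n (k + 1) - k) =
          (k + 1) :: List.range' (k + 2) (pvCount grid player dx dy x y n (k + 1) - (k + 1)) := by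
        have : pvCount grid player dx dy x y n (k + 1) - k =
            (pvCount grid player dx dy x y n (k + 1) - (k + 1)) + 1 := by omega
        rw [this, List.range'_succ]
      rw [hrange]
      simp [List.append_assoc]
    · simp

theorem pvBwdA_eq (grid : List (List Int)) (player dx dy x y : Int) :
    ∀ fuel (k : Nat) (coords : List (Int × Int)),
      pvBwdA grid player dx dy fuel (x - (k : Int) * dx) (y - (k : Int) * dy) coords =
      ((List.range' (k + 1) (pvCount grid player (-dx) (-dy) x y fuel k - k)).map
        (fun j : Nat => (x - (j : Int) * dx, y - (j : Int) * dy))).reverse ++ coords := by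
  intro fuel
  induction fuel with
  | zero => intro k coords; simp [pvBwdA, pvCount]
  | succ n ih =>
    intro k coords
    have hx : x - (k : Int) * dx - dx = x + ((k : Int) + 1) * (-dx) := by ring
    have hy : y - (k : Int) * dy - dy = y + ((k : Int) + 1) * (-dy) := by ring
    simp only [pvBwdA, pvCount, hx, hy]
    split
    · have hk1 : x + ((k : Int) + 1) * (-dx) = x - ((k + 1 : Nat) : Int) * dx := by push_cast; ring
      have hk2 : y + ((k : Int) + 1) * (-dy) = y - ((k + 1 : Nat) : Int) * dy := by push_cast; ring
      rw [hk1, hk2, ih (k + 1)]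
      have hle : k + 1 ≤ pvCount grid player (-dx) (-dy) x y n (k + 1) := pvCount_le _ _ _ _ _ _ _ _
      have hrange : List.range' (k + 1) (pvCount grid player (-dx) (-dy) x y n (k + 1) - k) =
          (k + 1) :: List.range' (k + 2) (pvCount grid player (-dx) (-dy) x y n (k + 1) - (k + 1)) := by
        have : pvCount grid player (-dx) (-dy) x y n (k + 1) - k =
            (pvCount grid player (-dx) (-dy) x y n (k + 1) - (k + 1)) + 1 := by omega
        rw [this, List.range'_succ]
      rw [hrange]
      simp [List.append_assoc]
    · simp

theorem pvDir_eq (grid : List (List Int)) (player dx dy x y : Int) :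
    pvBwdA grid player dx dy (grid.length + 1) x y
        (pvFwdA grid player dx dy (grid.length + 1) x y [(x, y)]) =
      (List.range (pvCount grid player (-dx) (-dy) x y (grid.length + 1) 0 +
                   pvCount grid player dx dy x y (grid.length + 1) 0 + 1)).map
        (fun i : Nat => (x - (pvCount grid player (-dx) (-dy) x y (grid.length + 1) 0 : Int) * dx + (i : Int) * dx,
                   y - (pvCount grid player (-dx) (-dy) x y (grid.length + 1) 0 : Int) * dy + (i : Int) * dy)) := by
  have hf := pvFwdA_eq grid player dx dy x y (grid.length + 1) 0 [(x, y)]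
  simp only [Nat.cast_zero, zero_mul, add_zero, Nat.sub_zero, zero_add] at hf
  have hb := pvBwdA_eq grid player dx dy x y (grid.length + 1) 0
      ([(x, y)] ++ (List.range' 1 (pvCount grid player dx dy x y (grid.length + 1) 0)).map
        (fun j : Nat => (x + (j : Int) * dx, y + (j : Int) * dy)))
  simp only [Nat.cast_zero, zero_mul, sub_zero, Nat.sub_zero, zero_add] at hb
  rw [hf, hb]
  set f := pvCount grid player dx dy x y (grid.length + 1) 0 with hfdef
  set b := pvCount grid player (-dx) (-dy) x y (grid.length + 1) 0 with hbdef
  have hsplit : List.range (b + f + 1) = List.range' 0 b ++ (b :: List.range' (b + 1) f) := by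
    rw [List.range_eq_range']
    rw [show b + f + 1 = b + (f + 1) by omega, ← List.range'_append_1, List.range'_succ]
    simp
  rw [hsplit, List.map_append, List.map_cons]
  have h1 : ((List.range' 1 b).map (fun j : Nat => (x - (j : Int) * dx, y - (j : Int) * dy))).reverse =
      (List.range' 0 b).map (fun i : Nat => (x - (b : Int) * dx + (i : Int) * dx, y - (b : Int) * dy + (i : Int) * dy)) := by
    rw [← List.map_reverse, List.reverse_range', List.map_map, show List.range' 0 b = List.range b from List.range_eq_range'.symm]
    refine List.map_congr_left ?_
    intro i hi
    rw [List.mem_range] at hi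
    have hc : ((1 + b - 1 - i : Nat) : Int) = (b : Int) - (i : Int) := by omega
    simp only [Function.comp, Prod.mk.injEq]
    constructor
    · rw [hc]; ring
    · rw [hc]; ring
  have h2 : (x, y) = (x - (b : Int) * dx + (b : Int) * dx, y - (b : Int) * dy + (b : Int) * dy) := by
    simp only [Prod.mk.injEq]; constructor <;> ring
  have h3 : (List.range' 1 f).map (fun j : Nat => (x + (j : Int) * dx, y + (j : Int) * dy)) =
      (List.range' (b + 1) f).map (fun i : Nat => (x - (b : Int) * dx + (i : Int) * dx, y - (b : Int) * dy + (i : Int) * dy)) := by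
    rw [show b + 1 = b + 1 from rfl, ← List.map_add_range', List.map_map]
    refine List.map_congr_left ?_
    intro j _
    simp only [Function.comp, Prod.mk.injEq]
    constructor <;> (push_cast; ring)
  rw [h1, h3]
  simp

-- ===== B-side: the cell test agrees with A's, and the sweep finds exactly the run [-b, f] =====
theorem pvHitCell_eq_ok (grid : List (List Int)) (player nx ny : Int) :
    pvHitCell grid player nx ny = pvOk grid player nx ny := by
  by_cases hb : (decide (0 ≤ nx) && decide (nx < (grid.length : Int)) && decide (0 ≤ ny) && decide (ny < (grid.length : Int))) = true
  · simp only [pvHitCell, pvOk, hb, Bool.true_and, if_true]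
    have hb' := hb
    simp only [Bool.and_eq_true, decide_eq_true_eq] at hb'
    obtain ⟨⟨⟨hx0, hx1⟩, hy0⟩, hy1⟩ := hb'
    have hylt : ny.toNat < grid.length := by omega
    rw [PySem.List.pyGet?_of_nonneg grid hy0, List.getElem?_eq_getElem hylt]
    simp only [Option.bind_some]
    rw [PySem.List.pyGet?_of_nonneg _ hx0]
    have hrow : grid.getD ny.toNat [] = grid[ny.toNat] := List.getD_eq_getElem grid [] hylt
    rw [hrow]
    by_cases hxin : nx.toNat < grid[ny.toNat].length
    · rw [List.getElem?_eq_getElem hxin, List.getD_eq_getElem _ 0 hxin]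
      have hlt : nx < (grid[ny.toNat].length : Int) := by omega
      simp only [hlt, decide_true, Bool.true_and]
      rfl
    · rw [List.getElem?_eq_none (by omega)]
      have hnlt : ¬ nx < (grid[ny.toNat].length : Int) := by omega
      simp [hnlt]
  · have hb' : (decide (0 ≤ nx) && decide (nx < (grid.length : Int)) && decide (0 ≤ ny) && decide (ny < (grid.length : Int))) = false :=
      Bool.eq_false_iff.mpr hb
    simp [pvHitCell, pvOk, hb']

theorem pvHit_eq (grid : List (List Int)) (player x y dx dy t : Int) :
    pvHit grid player x y dx dy t = ((t == 0) || pvOk grid player (x + t * dx) (y + t * dy)) := by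
  simp [pvHit, pvHitCell_eq_ok]

-- middle phase: from any t in [-b, f+1] with run_start = -b, the sweep ends the run at f+1
theorem pvSweep_mid (grid : List (List Int)) (player x y dx dy win_len : Int) (b f : Nat)
    (hfwd : ∀ t : Int, 1 ≤ t → t ≤ (f : Int) → pvOk grid player (x + t * dx) (y + t * dy) = true)
    (hbwd : ∀ t : Int, 1 ≤ t → t ≤ (b : Int) → pvOk grid player (x + (-t) * dx) (y + (-t) * dy) = true)
    (hfs : pvOk grid player (x + ((f : Int) + 1) * dx) (y + ((f : Int) + 1) * dy) = false)
    (hf : (f : Int) ≤ (grid.length : Int)) :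
    ∀ (fuel : Nat) (t : Int), -(b : Int) ≤ t → t ≤ (f : Int) + 1 → (f : Int) + 1 < t + (fuel : Int) →
    pvSweepB grid player x y dx dy win_len fuel t (-(b : Int)) =
      (if win_len ≤ (b : Int) + (f : Int) + 1 then
        some ((PySem.List.pyRange (-(b : Int)) ((f : Int) + 1) 1).map (fun u => (x + u * dx, y + u * dy)))
      else none) := by
  intro fuel
  induction fuel with
  | zero => intro t h1 h2 h3; omega
  | succ n ih =>
    intro t h1 h2 h3
    rcases lt_or_ge t ((f : Int) + 1) with hlt | hge
    · -- t ≤ f: the cell matches, continue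
      have htsz : t ≤ (grid.length : Int) := by omega
      have hhit : pvHit grid player x y dx dy t = true := by
        rw [pvHit_eq]
        by_cases ht0 : t = 0
        · simp [ht0]
        · rcases lt_or_ge t 0 with hneg | hpos
          · have := hbwd (-t) (by omega) (by omega)
            simp only [neg_neg] at this
            simp [this]
          · have := hfwd t (by omega) (by omega)
            simp [this]
      simp only [pvSweepB]
      rw [if_pos (by simp [htsz, hhit])]
      exact ih (t + 1) (by omega) (by omega) (by omega)
    · -- t = f+1: the run [-b, f] ends here
      have hteq : t = (f : Int) + 1 := by omega
      subst hteq
      have hcond : (decide ((f : Int) + 1 ≤ (grid.length : Int)) && pvHit grid player x y dx dy ((f : Int) + 1)) = false := by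
        by_cases hsz : (f : Int) + 1 ≤ (grid.length : Int)
        · have : pvHit grid player x y dx dy ((f : Int) + 1) = false := by
            rw [pvHit_eq]
            have hne : (((f : Int) + 1) == 0) = false := by
              simp only [beq_eq_false_iff_ne, ne_eq]
              omega
            simp [hne, hfs]
          simp [this]
        · simp [hsz]
      simp only [pvSweepB]
      rw [if_neg (fun hcon => Bool.false_ne_true (hcond ▸ hcon))]
      rw [if_pos (by
        simp only [Bool.and_eq_true, decide_eq_true_eq]
        constructor <;> omega)]
      have harith : (f : Int) + 1 - -(b : Int) = (b : Int) + (f : Int) + 1 := by ring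
      rw [harith]

-- pre phase: before reaching -b the sweep only closes runs that end left of 0
theorem pvSweep_pre (grid : List (List Int)) (player x y dx dy win_len : Int) (b f : Nat)
    (hfwd : ∀ t : Int, 1 ≤ t → t ≤ (f : Int) → pvOk grid player (x + t * dx) (y + t * dy) = true)
    (hbwd : ∀ t : Int, 1 ≤ t → t ≤ (b : Int) → pvOk grid player (x + (-t) * dx) (y + (-t) * dy) = true)
    (hfs : pvOk grid player (x + ((f : Int) + 1) * dx) (y + ((f : Int) + 1) * dy) = false)
    (hbs : pvOk grid player (x + (-(b : Int) - 1) * dx) (y + (-(b : Int) - 1) * dy) = false)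
    (hf : (f : Int) ≤ (grid.length : Int)) :
    ∀ (fuel : Nat) (t rs : Int), rs ≤ t → t ≤ -(b : Int) → (f : Int) + 1 < t + (fuel : Int) → rs ≤ 0 →
      (∀ u : Int, rs ≤ u → u < t → pvHit grid player x y dx dy u = true) →
    pvSweepB grid player x y dx dy win_len fuel t rs =
      (if win_len ≤ (b : Int) + (f : Int) + 1 then
        some ((PySem.List.pyRange (-(b : Int)) ((f : Int) + 1) 1).map (fun u => (x + u * dx, y + u * dy)))
      else none) := by
  intro fuel
  induction fuel with
  | zero => intro t rs h1 h2 h3 h4 h5; omega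
  | succ n ih =>
    intro t rs h1 h2 h3 h4 hinv
    rcases eq_or_lt_of_le h2 with hteq | hlt
    · -- t = -b: by the invariant the current run started exactly at -b
      have hrs : rs = -(b : Int) := by
        by_contra hne
        have hrslt : rs ≤ -(b : Int) - 1 := by omega
        have := hinv (-(b : Int) - 1) (by omega) (by omega)
        rw [pvHit_eq] at this
        have hne0 : ((-(b : Int) - 1) == 0) = false := by
          simp only [beq_eq_false_iff_ne, ne_eq]
          omega
        rw [hne0, hbs] at this
        simp at this
      subst hrs
      subst hteq
      exact pvSweep_mid grid player x y dx dy win_len b f hfwd hbwd hfs hf (n + 1) (-(b : Int))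
        le_rfl (by omega) (by omega)
    · -- t < -b
      have htsz : t ≤ (grid.length : Int) := by
        have : (0 : Int) ≤ (grid.length : Int) := by positivity
        omega
      by_cases hhit : pvHit grid player x y dx dy t = true
      · simp only [pvSweepB]
        rw [if_pos (by simp [htsz, hhit])]
        refine ih (t + 1) rs (by omega) (by omega) (by omega) h4 ?_
        intro u hu1 hu2
        rcases lt_or_ge u t with h | h
        · exact hinv u hu1 h
        · have : u = t := by omega
          subst this
          exact hhit
      · simp only [pvSweepB]
        rw [if_neg (by
          intro hcon
          simp only [Bool.and_eq_true] at hcon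
          exact hhit hcon.2)]
        rw [if_neg (by
          simp only [Bool.and_eq_true, decide_eq_true_eq, not_and]
          intro _
          omega)]
        refine ih (t + 1) (t + 1) le_rfl (by omega) (by omega) (by omega) ?_
        intro u hu1 hu2
        omega

-- the two per-direction result lists are the same arithmetic sequence
theorem pvList_eq (x y dx dy : Int) (b f : Nat) :
    (List.range (b + f + 1)).map
        (fun i : Nat => (x - (b : Int) * dx + (i : Int) * dx, y - (b : Int) * dy + (i : Int) * dy)) =
    (PySem.List.pyRange (-(b : Int)) ((f : Int) + 1) 1).map (fun u => (x + u * dx, y + u * dy)) := by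
  rw [PySem.List.pyRange_one]
  rw [List.map_map]
  have hlen : ((f : Int) + 1 - -(b : Int)).toNat = b + f + 1 := by omega
  rw [hlen]
  refine List.map_congr_left ?_
  intro i _
  simp only [Function.comp, Prod.mk.injEq]
  constructor <;> ring

theorem pvGo_eq (grid : List (List Int)) (x y player win_len : Int) :
    ∀ dirs : List (Int × Int),
      (∀ d ∈ dirs, d.1 = 1 ∨ d.1 = -1 ∨ d.2 = 1 ∨ d.2 = -1) →
      pvGoA grid x y player win_len dirs = pvGoB grid x y player win_len dirs := by
  intro dirs
  induction dirs with
  | nil => intro _; rfl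
  | cons d rest ih =>
    intro hdirs
    obtain ⟨dx, dy⟩ := d
    have hc : dx = 1 ∨ dx = -1 ∨ dy = 1 ∨ dy = -1 := hdirs (dx, dy) (List.mem_cons_self ..)
    have hcneg : -dx = 1 ∨ -dx = -1 ∨ -dy = 1 ∨ -dy = -1 := by omega
    obtain ⟨hfle, hfok, hfstop⟩ := pvCount_facts grid player dx dy x y hc
    obtain ⟨hble, hbok, hbstop⟩ := pvCount_facts grid player (-dx) (-dy) x y hcneg
    set f := pvCount grid player dx dy x y (grid.length + 1) 0 with hfdef
    set b := pvCount grid player (-dx) (-dy) x y (grid.length + 1) 0 with hbdef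
    have hbwd : ∀ t : Int, 1 ≤ t → t ≤ (b : Int) →
        pvOk grid player (x + (-t) * dx) (y + (-t) * dy) = true := by
      intro t h1 h2
      have := hbok t h1 h2
      have e1 : x + t * -dx = x + (-t) * dx := by ring
      have e2 : y + t * -dy = y + (-t) * dy := by ring
      rw [e1, e2] at this
      exact this
    have hbs : pvOk grid player (x + (-(b : Int) - 1) * dx) (y + (-(b : Int) - 1) * dy) = false := by
      have e1 : x + ((b : Int) + 1) * -dx = x + (-(b : Int) - 1) * dx := by ring
      have e2 : y + ((b : Int) + 1) * -dy = y + (-(b : Int) - 1) * dy := by ring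
      rw [e1, e2] at hbstop
      exact hbstop
    have hsweep := pvSweep_pre grid player x y dx dy win_len b f hfok hbwd hfstop hbs hfle
      (2 * grid.length + 2) (-(grid.length : Int)) (-(grid.length : Int))
      le_rfl (by omega) (by push_cast; omega) (by omega) (by intro u h1 h2; omega)
    simp only [pvGoA, pvGoB, pvDir_eq, ← hfdef, ← hbdef, hsweep]
    by_cases hwin : win_len ≤ (b : Int) + (f : Int) + 1
    · rw [if_pos hwin]
      rw [if_pos (by
        rw [List.length_map, List.length_range]
        push_cast
        omega)]
      rw [pvList_eq]
    · rw [if_neg hwin]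
      rw [if_neg (by
        rw [List.length_map, List.length_range]
        push_cast
        omega)]
      exact ih (fun d hd => hdirs d (List.mem_cons_of_mem _ hd))

-- ===== VERDICT (by name: the statement is the Claim_ definition above) =====
theorem get_win_line_spec : Claim_equal_get_win_line := by
  intro grid x y player win_len _ _
  unfold Spec_get_win_line get_win_line get_win_line_alt
  apply pvGo_eq
  intro d hd
  fin_cases hd <;> norm_num
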